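-- pv_equiv track=rewrite | github.com/LewisMagangi/cryptography_web_app | analysis/data/sample_text/fak-range-data-gen.py | get_size_combinations
-- ===== SOURCE A (Python) =====
-- def get_size_combinations(size_mb):
--     """Break down sizes > 10MB into combinations of smaller sizes"""
--     base_sizes = [10, 5, 2, 1]
--     combination = []
--     remaining = size_mb
--     for base in base_sizes:
--         while remaining >= base:
--             combination.append(base)
--             remaining -= base
--     return combination
-- ===== SOURCE B (Python) =====
-- def get_size_combinations(size_mb):
--     """Break down sizes > 10MB into combinations of smaller sizes"""
--     combination = []
--     remaining = size_mb
--     for base in (10, 5, 2, 1):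
--         if remaining >= base:
--             q, remaining = divmod(remaining, base)
--             combination.extend([base] * q)
--     return combination
-- ===== Notes on version B (the rewrite author's own statement) =====
-- stated objective: faster
-- what changed: replaces the per-unit while loops (one list append per MB) with one divmod per denomination and a single list-replication, removing the O(size_mb) inner loop
import Mathlib
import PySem

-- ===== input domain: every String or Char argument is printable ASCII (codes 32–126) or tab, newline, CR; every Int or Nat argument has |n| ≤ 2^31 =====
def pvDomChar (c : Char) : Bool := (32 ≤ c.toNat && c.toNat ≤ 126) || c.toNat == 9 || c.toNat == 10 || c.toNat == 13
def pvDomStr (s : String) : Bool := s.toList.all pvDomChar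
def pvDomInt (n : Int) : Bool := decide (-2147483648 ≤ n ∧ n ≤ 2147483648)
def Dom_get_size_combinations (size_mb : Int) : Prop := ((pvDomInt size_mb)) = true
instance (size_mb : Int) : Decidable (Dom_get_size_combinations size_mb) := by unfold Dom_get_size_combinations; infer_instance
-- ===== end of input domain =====

-- B replaces A's per-unit while loops with one divmod per denomination (objective: faster).
-- ===== PORT A =====
-- the inner 'while remaining >= base: combination.append(base); remaining -= base'
-- (the 0 < base guard only makes the recursion total; every call has base ∈ {10,5,2,1})
def pvWhileA (base remaining : Int) : List Int × Int :=
  if _h : 0 < base ∧ base ≤ remaining then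
    let p := pvWhileA base (remaining - base)
    (base :: p.1, p.2)
  else ([], remaining)
termination_by remaining.toNat
decreasing_by omega

def get_size_combinations (size_mb : Int) : List Int :=
  (([10, 5, 2, 1] : List Int).foldl
    (fun st base =>
      let p := pvWhileA base st.2
      (st.1 ++ p.1, p.2))
    ([], size_mb)).1

-- ===== PORT B =====
-- 'if remaining >= base: q, remaining = divmod(remaining, base); combination.extend([base]*q)'
def pvStepB (st : List Int × Int) (base : Int) : List Int × Int :=
  if base ≤ st.2 then
    (st.1 ++ List.replicate (PySem.Int.floordiv st.2 base).toNat base,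
     PySem.Int.mod st.2 base)
  else st

def get_size_combinations_alt (size_mb : Int) : List Int :=
  (([10, 5, 2, 1] : List Int).foldl pvStepB ([], size_mb)).1

-- ===== PRECONDITION & SPEC =====
def Spec_get_size_combinations (size_mb : Int) (out : List Int) : Prop := out = get_size_combinations_alt size_mb
instance (size_mb : Int) (out : List Int) : Decidable (Spec_get_size_combinations size_mb out) := by unfold Spec_get_size_combinations; infer_instance

-- ===== CLAIM (what is proved, stated in full; the proofs are below) =====
def Claim_equal_get_size_combinations : Prop := ∀ (size_mb : Int), Dom_get_size_combinations size_mb → Spec_get_size_combinations size_mb (get_size_combinations size_mb)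

-- ===== LEMMAS AND PROOFS =====

lemma pvWhileA_eq (base : Int) (hb : 0 < base) : ∀ r : Int,
    pvWhileA base r =
      if base ≤ r then
        (List.replicate (PySem.Int.floordiv r base).toNat base, PySem.Int.mod r base)
      else ([], r) := by
  intro r
  induction r using (measure Int.toNat).wf.induction with
  | _ r ih =>
    rw [pvWhileA]
    by_cases h : base ≤ r
    · have hrec := ih (r - base) (by change (r - base).toNat < r.toNat; omega)
      simp only [hb, h, and_self, dite_true, hrec, if_true, Prod.mk.injEq]
      by_cases h2 : base ≤ r - base
      · simp only [if_pos h2]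

        have hq' := (PySem.Int.floordiv_eq_iff_of_pos hb).mp
          (rfl : PySem.Int.floordiv (r - base) base = PySem.Int.floordiv (r - base) base)
        have hd : PySem.Int.floordiv r base = PySem.Int.floordiv (r - base) base + 1 := by
          rw [PySem.Int.floordiv_eq_iff_of_pos hb]
          constructor <;> nlinarith [hq'.1, hq'.2]
        have hqn : 0 ≤ PySem.Int.floordiv (r - base) base := by nlinarith [hq'.2]
        constructor
        · rw [hd]
          have ht : (PySem.Int.floordiv (r - base) base + 1).toNat
              = (PySem.Int.floordiv (r - base) base).toNat + 1 := by omega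
          rw [ht, List.replicate_succ]
        · have m1 := PySem.Int.floordiv_mul_add_mod r base
          have m2 := PySem.Int.floordiv_mul_add_mod (r - base) base
          have he : PySem.Int.floordiv r base * base
              = PySem.Int.floordiv (r - base) base * base + base := by rw [hd]; ring
          omega
      · simp only [if_neg h2]
        have hd : PySem.Int.floordiv r base = 1 := by
          rw [PySem.Int.floordiv_eq_iff_of_pos hb]
          constructor <;> omega
        have m1 := PySem.Int.floordiv_mul_add_mod r base
        rw [hd] at m1 ⊢
        constructor
        · rfl
        · omega
    · simp only [h, and_false, dite_false, if_false]

lemma pvStep_eq (st : List Int × Int) (base : Int) (hb : 0 < base) :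
    (let p := pvWhileA base st.2; (st.1 ++ p.1, p.2)) = pvStepB st base := by
  rw [pvWhileA_eq base hb st.2]
  unfold pvStepB
  by_cases h : base ≤ st.2
  · simp [h]
  · simp [h]

lemma pvFoldl_eq : ∀ (l : List Int), (∀ b ∈ l, 0 < b) → ∀ st : List Int × Int,
    l.foldl (fun st base => let p := pvWhileA base st.2; (st.1 ++ p.1, p.2)) st
      = l.foldl pvStepB st := by
  intro l
  induction l with
  | nil => intro _ st; rfl
  | cons b t ih =>
    intro hpos st
    simp only [List.foldl]
    rw [pvStep_eq st b (hpos b (List.mem_cons_self ..))]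
    exact ih (fun x hx => hpos x (List.mem_cons_of_mem _ hx)) _

-- ===== VERDICT (by name: the statement is the Claim_ definition above) =====
theorem get_size_combinations_spec : Claim_equal_get_size_combinations := by
  intro size_mb _
  unfold Spec_get_size_combinations get_size_combinations get_size_combinations_alt
  rw [pvFoldl_eq _ (by decide)]
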